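-- pv_equiv track=rewrite | github.com/abbas0011/final | final.py | harshtag
-- ===== SOURCE A (Python) =====
-- def harshtag(sentence):
--     words = sentence.split()
--     new_words = []
--     for word in words:
--         newword = word
--         new_words.append(newword)
--     joined_word = ''.join(new_words)
--     return '#'+joined_word
-- ===== SOURCE B (Python) =====
-- def harshtag(sentence):
--     return '#' + ''.join(ch for ch in sentence if not ch.isspace())
-- ===== Notes on version B (the rewrite author's own statement) =====
-- stated objective: simpler
-- what changed: Replaces the split-into-words / copy-each-word / join pipeline with a single character-level pass that keeps non-whitespace characters and prepends the hashtag character; no word list is built.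
import Mathlib
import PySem

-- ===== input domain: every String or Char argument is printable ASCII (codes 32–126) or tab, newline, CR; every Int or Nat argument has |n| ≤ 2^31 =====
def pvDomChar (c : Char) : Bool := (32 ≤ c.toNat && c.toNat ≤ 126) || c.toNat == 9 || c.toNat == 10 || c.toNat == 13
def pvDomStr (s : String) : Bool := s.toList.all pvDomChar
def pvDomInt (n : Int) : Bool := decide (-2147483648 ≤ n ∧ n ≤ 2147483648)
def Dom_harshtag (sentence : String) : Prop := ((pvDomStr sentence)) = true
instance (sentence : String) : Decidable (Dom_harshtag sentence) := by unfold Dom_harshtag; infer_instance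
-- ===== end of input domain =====

-- B replaces A's split-words-then-join pipeline with a single character-level filter pass; objective: simpler.


-- ===== PORT A =====
def harshtag (sentence : String) : String :=
  let words := PySem.Str.split₀ sentence
  let new_words := words.foldl (fun acc word => let newword := word; acc ++ [newword]) []
  let joined_word := PySem.Str.join "" new_words
  "#" ++ joined_word

-- ===== PORT B =====
def harshtag_alt (sentence : String) : String :=
  "#" ++ String.ofList (sentence.toList.filter (fun ch => !PySem.Chars.isspace ch))

-- ===== PRECONDITION & SPEC =====
def Spec_harshtag (sentence : String) (out : String) : Prop := out = harshtag_alt sentence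
instance (sentence : String) (out : String) : Decidable (Spec_harshtag sentence out) := by unfold Spec_harshtag; infer_instance

-- ===== CLAIM (what is proved, stated in full; the proofs are below) =====
def Claim_equal_harshtag : Prop := ∀ (sentence : String), Dom_harshtag sentence → Spec_harshtag sentence (harshtag sentence)

-- ===== LEMMAS AND PROOFS =====

-- the append-each-element loop of A is the identity on the word list
theorem foldl_append_id {α : Type} (l acc : List α) :
    l.foldl (fun a w => a ++ [w]) acc = acc ++ l := by
  induction l generalizing acc with
  | nil => simp
  | cons x xs ih => simp [List.foldl, ih]

-- joining with the empty separator flattens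
theorem join_nil_eq_flatten (l : List (List Char)) :
    PySem.Chars.join [] l = l.flatten := by
  induction l with
  | nil => rfl
  | cons x xs ih =>
    cases xs with
    | nil => simp [PySem.Chars.join, List.intercalate]
    | cons y ys =>
      rw [PySem.Chars.join_cons_cons, ih]
      simp

-- invariant of split₀'s worker: flattening its result recovers exactly the non-space characters
theorem go_flatten (s cur : List Char) (acc : List (List Char)) :
    (PySem.Chars.split₀.go s cur acc).flatten
      = acc.reverse.flatten ++ cur.reverse ++ s.filter (fun c => !PySem.Chars.isspace c) := by
  induction s generalizing cur acc with
  | nil =>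
    by_cases h : cur.isEmpty
    · have hc : cur = [] := List.isEmpty_iff.mp h
      simp [PySem.Chars.split₀.go, hc]
    · simp [PySem.Chars.split₀.go, h]
  | cons c rest ih =>
    by_cases hs : PySem.Chars.isspace c
    · by_cases h : cur.isEmpty
      · have hc : cur = [] := List.isEmpty_iff.mp h
        simp [PySem.Chars.split₀.go, hs, h, hc, ih]
      · simp [PySem.Chars.split₀.go, hs, h, ih]
    · simp [PySem.Chars.split₀.go, hs, ih]

theorem split₀_flatten (s : List Char) :
    (PySem.Chars.split₀ s).flatten = s.filter (fun c => !PySem.Chars.isspace c) := by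
  simpa using go_flatten s [] []

-- ===== VERDICT (by name: the statement is the Claim_ definition above) =====
theorem harshtag_spec : Claim_equal_harshtag := by
  intro sentence _
  unfold Spec_harshtag harshtag harshtag_alt
  simp only [foldl_append_id, List.nil_append]
  apply String.ext
  rw [String.toList_append, PySem.Str.toList_join, PySem.Str.split₀_map_toList]
  simp [join_nil_eq_flatten, split₀_flatten]
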